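-- pv_equiv track=rewrite | github.com/joshanashakya/dissertation | workspace/dataset/java-python/GeeksForGeeks/3963/A/2.py | getTotalCoverageOfMatrix
-- ===== SOURCE A (Python) =====
-- R = 4
--
-- C = 4
--
-- def getTotalCoverageOfMatrix(mat):
--     res = 0
--
--     # looping for all rows of matrix
--     for i in range(R):
--
--         isOne = False # 1 is not seen yet
--
--         # looping in columns from left to right
--         # direction to get left ones
--         for j in range(C):
--
--             # If one is found from left
--             if (mat[i][j] == 1):
--                 isOne = True
--
--             # If 0 is found and we have found
--             # a 1 before.
--             elif (isOne):
--                 res += 1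
--
--         # Repeat the above process for right to
--         # left direction.
--         isOne = False
--         for j in range(C - 1, -1, -1):
--             if (mat[i][j] == 1):
--                 isOne = True
--             elif (isOne):
--                 res += 1
--
--     # Traversing across columms for up and down
--     # directions.
--     for j in range(C):
--         isOne = False # 1 is not seen yet
--         for i in range(R):
--
--             if (mat[i][j] == 1):
--                 isOne = True
--             elif (isOne):
--                 res += 1
--
--         isOne = False
--         for i in range(R - 1, -1, -1):
--             if (mat[i][j] == 1):
--                 isOne = True
--             elif (isOne):
--                 res += 1
--
--     return res
-- ===== SOURCE B (Python) =====
-- R = 4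
--
-- C = 4
--
-- def _line_contrib(line):
--     ones = [p for p, v in enumerate(line) if v == 1]
--     if not ones:
--         return 0
--     k = len(ones)
--     return (len(line) - 1 - ones[0]) - (k - 1) + ones[-1] - (k - 1)
--
-- def getTotalCoverageOfMatrix(mat):
--     total = 0
--     for i in range(R):
--         total += _line_contrib([mat[i][j] for j in range(C)])
--     for j in range(C):
--         total += _line_contrib([mat[i][j] for i in range(R)])
--     return total
-- ===== Notes on version B (the rewrite author's own statement) =====
-- stated objective: simpler
-- what changed: B replaces A's four directional seen-a-1 flag scans per line with one pass per row/column that collects the indices of 1s and computes the coverage contribution in closed form from the first index, last index and count of 1s.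
import Mathlib
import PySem

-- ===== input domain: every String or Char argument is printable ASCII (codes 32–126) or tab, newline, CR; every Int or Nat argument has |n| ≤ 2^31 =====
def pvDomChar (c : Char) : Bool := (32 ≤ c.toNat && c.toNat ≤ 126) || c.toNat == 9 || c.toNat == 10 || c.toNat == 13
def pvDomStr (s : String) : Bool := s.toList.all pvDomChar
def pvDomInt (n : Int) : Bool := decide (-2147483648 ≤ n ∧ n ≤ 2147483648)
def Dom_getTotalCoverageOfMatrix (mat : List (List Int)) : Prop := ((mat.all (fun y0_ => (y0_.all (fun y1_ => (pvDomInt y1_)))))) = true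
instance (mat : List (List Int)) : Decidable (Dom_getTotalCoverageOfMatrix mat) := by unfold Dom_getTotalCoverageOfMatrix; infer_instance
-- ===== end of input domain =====

-- B derives each line's coverage count in closed form from the first/last index and number of 1s,
-- instead of A's two directional flag scans per line (objective: simpler).

-- ===== PORT A =====
-- A's two directional scans over one line (values fetched through `f`), threading res and the isOne flag.
def pvScanA (res : Int) (f : Int → Int) : Int :=
  let st := (PySem.List.pyRange 0 4 1).foldl
      (fun (st : Int × Bool) j =>
        if f j = 1 then (st.1, true) else if st.2 then (st.1 + 1, st.2) else st)
      (res, false)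
  let st2 := (PySem.List.pyRange 3 (-1) (-1)).foldl
      (fun (st : Int × Bool) j =>
        if f j = 1 then (st.1, true) else if st.2 then (st.1 + 1, st.2) else st)
      (st.1, false)
  st2.1

def getTotalCoverageOfMatrix (mat : List (List Int)) : Int :=
  let res : Int := 0
  let res := (PySem.List.pyRange 0 4 1).foldl
      (fun res i => pvScanA res (fun j => PySem.List.pyGetD (PySem.List.pyGetD mat i []) j 0)) res
  (PySem.List.pyRange 0 4 1).foldl
      (fun res j => pvScanA res (fun i => PySem.List.pyGetD (PySem.List.pyGetD mat i []) j 0)) res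

-- ===== PORT B =====
def pvLineContrib (line : List Int) : Int :=
  let ones := ((PySem.List.enumerate line).filter (fun pv => pv.2 == 1)).map (fun pv => pv.1)
  match ones with
  | [] => 0
  | f :: rest =>
    let k : Int := (f :: rest).length
    ((line.length : Int) - 1 - f) - (k - 1) + ((f :: rest).getLast (by simp) - (k - 1))

def getTotalCoverageOfMatrix_alt (mat : List (List Int)) : Int :=
  let rows := ((PySem.List.pyRange 0 4 1).map (fun i =>
      pvLineContrib ((PySem.List.pyRange 0 4 1).map
        (fun j => PySem.List.pyGetD (PySem.List.pyGetD mat i []) j 0)))).sum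
  let cols := ((PySem.List.pyRange 0 4 1).map (fun j =>
      pvLineContrib ((PySem.List.pyRange 0 4 1).map
        (fun i => PySem.List.pyGetD (PySem.List.pyGetD mat i []) j 0)))).sum
  rows + cols

-- ===== PRECONDITION & SPEC =====
-- Pre_ excludes exactly the matrices with fewer than 4 rows, or a row among the first 4 with fewer
-- than 4 entries: there the Python A (and B alike) raises IndexError on mat[i][j].
def Pre_getTotalCoverageOfMatrix (mat : List (List Int)) : Prop :=
  4 ≤ mat.length ∧ ∀ i : Nat, i < 4 → 4 ≤ (mat.getD i []).length
instance (mat : List (List Int)) : Decidable (Pre_getTotalCoverageOfMatrix mat) := by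
  unfold Pre_getTotalCoverageOfMatrix; infer_instance
def pvWitness_getTotalCoverageOfMatrix : List (List Int) :=
  [[1, 0, 0, 1], [0, 0, 0, 0], [0, 1, 2, 0], [1, 1, 1, 1]]

def Spec_getTotalCoverageOfMatrix (mat : List (List Int)) (out : Int) : Prop := out = getTotalCoverageOfMatrix_alt mat
instance (mat : List (List Int)) (out : Int) : Decidable (Spec_getTotalCoverageOfMatrix mat out) := by unfold Spec_getTotalCoverageOfMatrix; infer_instance

-- ===== CLAIM (what is proved, stated in full; the proofs are below) =====
def Claim_equal_getTotalCoverageOfMatrix : Prop := ∀ (mat : List (List Int)), Dom_getTotalCoverageOfMatrix mat → Pre_getTotalCoverageOfMatrix mat → Spec_getTotalCoverageOfMatrix mat (getTotalCoverageOfMatrix mat)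

-- ===== LEMMAS AND PROOFS =====

lemma pvRange04 : PySem.List.pyRange 0 4 1 = [0, 1, 2, 3] := by decide

lemma pvRange30 : PySem.List.pyRange 3 (-1) (-1) = [3, 2, 1, 0] := by decide

-- The key per-line fact: A's two flag scans over a 4-long line equal B's closed form.
lemma pvScanA_eq (res : Int) (f : Int → Int) :
    pvScanA res f = res + pvLineContrib [f 0, f 1, f 2, f 3] := by
  by_cases h0 : f 0 = 1 <;> by_cases h1 : f 1 = 1 <;> by_cases h2 : f 2 = 1 <;> by_cases h3 : f 3 = 1 <;>
    simp [pvScanA, pvLineContrib, pvRange04, pvRange30, PySem.List.enumerate, h0, h1, h2, h3] <;>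
    ring

-- ===== VERDICT (by name: the statement is the Claim_ definition above) =====
theorem getTotalCoverageOfMatrix_spec : Claim_equal_getTotalCoverageOfMatrix := by
  intro mat _ _
  show _ = _
  simp only [getTotalCoverageOfMatrix, getTotalCoverageOfMatrix_alt, pvRange04,
    List.foldl, List.map, List.sum, List.foldr, pvScanA_eq]
  ring
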